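-- pv_equiv track=rewrite | github.com/AdarshJ173/apitester | api_tester.py | _sanitize_messages_for_api
-- ===== SOURCE A (Python) =====
-- from typing import Dict, List, Optional
--
-- def _sanitize_messages_for_api(messages: List[Dict]) -> List[Dict]:
--     """Sanitize messages to ensure proper format for OpenAI-style APIs.
--
--     Rules enforced:
--     1. Every 'tool' role message MUST have a 'tool_call_id' field
--     2. Tool messages must follow an assistant message that has 'tool_calls'
--     3. No system messages between assistant tool_calls and tool results
--     4. Remove orphaned tool messages that lack proper context
--     """
--     sanitized = []
--     i = 0
--     while i < len(messages):
--         msg = messages[i]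
--         role = msg.get("role")
--
--         if role == "assistant" and msg.get("tool_calls"):
--             # Add the assistant message with tool_calls
--             sanitized.append(msg)
--             i += 1
--
--             # Collect all subsequent tool messages first, defer system messages
--             deferred_system = []
--             while i < len(messages):
--                 next_msg = messages[i]
--                 if next_msg.get("role") == "tool":
--                     if next_msg.get("tool_call_id"):
--                         sanitized.append(next_msg)
--                     # Skip tool messages without tool_call_id (broken)
--                     i += 1
--                 elif next_msg.get("role") == "system":
--                     # Defer system messages until after ALL tool messages
--                     deferred_system.append(next_msg)
--                     i += 1
--                 else:
--                     break
--             # Now add any deferred system messages AFTER all tool results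
--             sanitized.extend(deferred_system)
--         elif role == "tool":
--             # Orphaned tool message (no preceding assistant with tool_calls)
--             # Skip it to prevent API errors
--             i += 1
--         else:
--             sanitized.append(msg)
--             i += 1
--
--     return sanitized
-- ===== SOURCE B (Python) =====
-- from typing import Dict, List, Optional
--
-- def _sanitize_messages_for_api(messages: List[Dict]) -> List[Dict]:
--     """Sanitize messages for OpenAI-style APIs: one flat pass with a
--     collecting_tools flag and a deferred_system buffer."""
--     sanitized = []
--     collecting_tools = False
--     deferred_system = []
--     for msg in messages:
--         role = msg.get("role")
--         if collecting_tools and role == "tool":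
--             if msg.get("tool_call_id"):
--                 sanitized.append(msg)
--             continue
--         if collecting_tools and role == "system":
--             deferred_system.append(msg)
--             continue
--         if collecting_tools:
--             # block of tool results ended: flush deferred system messages
--             sanitized.extend(deferred_system)
--             deferred_system = []
--             collecting_tools = False
--         # normal rules
--         if role == "assistant" and msg.get("tool_calls"):
--             sanitized.append(msg)
--             collecting_tools = True
--         elif role == "tool":
--             pass  # orphaned tool message
--         else:
--             sanitized.append(msg)
--     if collecting_tools:
--         sanitized.extend(deferred_system)
--     return sanitized
-- ===== Notes on version B (the rewrite author's own statement) =====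
-- stated objective: simpler
-- what changed: Replaced A's nested shared-index while loops (an inner loop that consumes the tool/system block) with one flat pass over the messages keeping two pieces of state, a collecting_tools flag and a deferred_system buffer, flushed when the block ends or at EOF.
import Mathlib
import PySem

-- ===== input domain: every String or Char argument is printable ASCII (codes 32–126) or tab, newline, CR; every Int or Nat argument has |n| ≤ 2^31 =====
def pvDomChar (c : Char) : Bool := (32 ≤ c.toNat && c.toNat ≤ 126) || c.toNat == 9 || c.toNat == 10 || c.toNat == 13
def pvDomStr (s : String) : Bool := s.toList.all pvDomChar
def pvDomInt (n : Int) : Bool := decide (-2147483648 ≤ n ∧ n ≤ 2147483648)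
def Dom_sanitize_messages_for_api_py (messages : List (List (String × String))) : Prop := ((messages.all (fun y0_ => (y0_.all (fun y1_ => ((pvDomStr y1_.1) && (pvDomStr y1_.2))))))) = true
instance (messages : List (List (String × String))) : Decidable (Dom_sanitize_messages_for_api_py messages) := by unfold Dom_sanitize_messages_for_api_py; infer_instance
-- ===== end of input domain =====

-- B replaces A's nested shared-index while loops by one flat pass with a collecting flag
-- and a deferred-system buffer (different decomposition, same cost).

-- ===== PORT A =====
-- msg.get(k): first-match lookup on the association list
def pvGetV (m : List (String × String)) (k : String) : Option String := m.lookup k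

-- truthiness of msg.get(k) (None and "" are falsy)
def pvTruthy (m : List (String × String)) (k : String) : Bool :=
  match pvGetV m k with
  | some s => s ≠ ""
  | none => false

-- A's inner while loop: collects tool messages (with tool_call_id), defers system
-- messages, and stops at the first other message; returns (tools, deferred, rest).
def pvCollect : List (List (String × String)) →
    List (List (String × String)) × List (List (String × String)) × List (List (String × String))
  | [] => ([], [], [])
  | n :: rest =>
    if pvGetV n "role" == some "tool" then
      let c := pvCollect rest
      ((if pvTruthy n "tool_call_id" then n :: c.1 else c.1), c.2.1, c.2.2)
    else if pvGetV n "role" == some "system" then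
      let c := pvCollect rest
      (c.1, n :: c.2.1, c.2.2)
    else ([], [], n :: rest)

theorem pvCollect_rest_length (l : List (List (String × String))) :
    (pvCollect l).2.2.length ≤ l.length := by
  induction l with
  | nil => simp [pvCollect]
  | cons n rest ih =>
    simp only [pvCollect]
    split_ifs <;> simp <;> omega

def sanitize_messages_for_api_py : List (List (String × String)) → List (List (String × String))
  | [] => []
  | m :: rest =>
    if pvGetV m "role" == some "assistant" && pvTruthy m "tool_calls" then
      let c := pvCollect rest
      m :: (c.1 ++ c.2.1 ++ sanitize_messages_for_api_py c.2.2)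
    else if pvGetV m "role" == some "tool" then
      sanitize_messages_for_api_py rest
    else
      m :: sanitize_messages_for_api_py rest
termination_by l => l.length
decreasing_by
  · exact Nat.lt_succ_of_le (pvCollect_rest_length rest)
  · simp
  · simp

-- ===== PORT B =====
-- B's single flat loop: state = (collecting_tools, deferred_system); returns the rest of the output.
def pvBLoop (collecting : Bool) (d : List (List (String × String))) :
    List (List (String × String)) → List (List (String × String))
  | [] => if collecting then d else []
  | m :: rest =>
    if collecting && (pvGetV m "role" == some "tool") then
      (if pvTruthy m "tool_call_id" then [m] else []) ++ pvBLoop collecting d rest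
    else if collecting && (pvGetV m "role" == some "system") then
      pvBLoop collecting (d ++ [m]) rest
    else
      let pre := if collecting then d else []
      if pvGetV m "role" == some "assistant" && pvTruthy m "tool_calls" then
        pre ++ m :: pvBLoop true [] rest
      else if pvGetV m "role" == some "tool" then
        pre ++ pvBLoop false [] rest
      else
        pre ++ m :: pvBLoop false [] rest

def sanitize_messages_for_api_py_alt (messages : List (List (String × String))) :
    List (List (String × String)) := pvBLoop false [] messages

-- ===== PRECONDITION & SPEC =====
def Spec_sanitize_messages_for_api_py (messages : List (List (String × String))) (out : List (List (String × String))) : Prop := out = sanitize_messages_for_api_py_alt messages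
instance (messages : List (List (String × String))) (out : List (List (String × String))) : Decidable (Spec_sanitize_messages_for_api_py messages out) := by unfold Spec_sanitize_messages_for_api_py; infer_instance

-- ===== CLAIM (what is proved, stated in full; the proofs are below) =====
def Claim_equal_sanitize_messages_for_api_py : Prop := ∀ (messages : List (List (String × String))), Dom_sanitize_messages_for_api_py messages → Spec_sanitize_messages_for_api_py messages (sanitize_messages_for_api_py messages)

-- ===== LEMMAS AND PROOFS =====

-- Main invariant, by strong induction on the length: in the collecting state B produces
-- A's inner-loop output (tools, then flushed deferred, then the continuation), and in the
-- normal state B agrees with A; the deferred buffer is ignored when not collecting.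
theorem pvBLoop_invariant : ∀ (n : ℕ) (ms : List (List (String × String))), ms.length ≤ n →
    (∀ d, pvBLoop true d ms =
      (pvCollect ms).1 ++ d ++ (pvCollect ms).2.1 ++ sanitize_messages_for_api_py (pvCollect ms).2.2)
    ∧ (∀ d, pvBLoop false d ms = sanitize_messages_for_api_py ms) := by
  intro n
  induction n with
  | zero =>
    intro ms hms
    have : ms = [] := List.length_eq_zero_iff.mp (Nat.le_zero.mp hms)
    subst this
    constructor <;> intro d <;> simp [pvBLoop, pvCollect, sanitize_messages_for_api_py]
  | succ n ih =>
    intro ms hms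
    match ms with
    | [] =>
      constructor <;> intro d <;> simp [pvBLoop, pvCollect, sanitize_messages_for_api_py]
    | m :: rest =>
      have hr : rest.length ≤ n := by simpa using Nat.lt_succ_iff.mp (Nat.lt_of_lt_of_le (by simp) hms)
      have IH := ih rest hr
      -- the normal-state case first (it only needs IH on rest)
      have hF : ∀ d, pvBLoop false d (m :: rest) = sanitize_messages_for_api_py (m :: rest) := by
        intro d
        simp only [pvBLoop, Bool.false_and, Bool.false_eq_true, if_false,
          sanitize_messages_for_api_py]
        by_cases h1 : (pvGetV m "role" == some "assistant" && pvTruthy m "tool_calls") = true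
        · simp only [h1, if_true]
          rw [(IH.1 [])]
          simp
        · simp only [h1]
          by_cases h2 : (pvGetV m "role" == some "tool") = true
          · simp [h2, IH.2 []]
          · simp [h2, IH.2 []]
      refine ⟨?_, hF⟩
      intro d
      by_cases ht : (pvGetV m "role" == some "tool") = true
      · -- tool: stays collecting
        simp only [pvBLoop, pvCollect, ht, Bool.true_and, if_true]
        rw [IH.1 d]
        by_cases hid : pvTruthy m "tool_call_id" = true <;> simp [hid]
      · by_cases hs : (pvGetV m "role" == some "system") = true
        · -- system: deferred
          simp only [pvBLoop, pvCollect, ht, hs, Bool.true_and, if_true]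
          rw [IH.1 (d ++ [m])]
          simp
        · -- break: flush deferred, then the normal rules on this same message
          have hc : pvCollect (m :: rest) = ([], [], m :: rest) := by
            simp [pvCollect, ht, hs]
          simp only [pvBLoop, ht, hs, Bool.true_and, Bool.false_eq_true, if_false, if_true, hc]
          by_cases h1 : (pvGetV m "role" == some "assistant" && pvTruthy m "tool_calls") = true
          · simp only [h1, if_true, sanitize_messages_for_api_py]
            rw [IH.1 []]
            simp
          · simp only [h1]
            simp [sanitize_messages_for_api_py, h1, ht, IH.2 []]

-- ===== VERDICT (by name: the statement is the Claim_ definition above) =====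
theorem sanitize_messages_for_api_py_spec : Claim_equal_sanitize_messages_for_api_py := by
  intro messages _
  unfold Spec_sanitize_messages_for_api_py sanitize_messages_for_api_py_alt
  exact ((pvBLoop_invariant messages.length messages le_rfl).2 []).symm
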